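-- pv_equiv track=rewrite | github.com/Tomas1307/Reinforcement_learning_milp_heuristic | tests/evaluator.py | _identify_bottleneck_improved
-- ===== SOURCE A (Python) =====
-- def _identify_bottleneck_improved(energy_limited: int, spot_limited: int,
--                                 charger_limited: int, time_limited: int, total_vehicles: int) -> str:
--     """Improved bottleneck identification."""
--
--     # Find the most restrictive constraint
--     constraints = {
--         'energy': energy_limited,
--         'spots': spot_limited,
--         'chargers': charger_limited,
--         'time': time_limited,
--         'demand': total_vehicles
--     }
--
--     min_capacity = min(constraints.values())
--
--     # Identify which constraint(s) are limiting
--     limiting_factors = [name for name, value in constraints.items() if value == min_capacity]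
--
--     if len(limiting_factors) == 1:
--         return limiting_factors[0]
--     elif 'energy' in limiting_factors:
--         return 'energy'
--     elif 'spots' in limiting_factors:
--         return 'spots'
--     elif 'chargers' in limiting_factors:
--         return 'chargers'
--     elif 'time' in limiting_factors:
--         return 'time'
--     else:
--         return 'none'
-- ===== SOURCE B (Python) =====
-- def _identify_bottleneck_improved(energy_limited: int, spot_limited: int,
--                                 charger_limited: int, time_limited: int, total_vehicles: int) -> str:
--     candidates = [('energy', energy_limited), ('spots', spot_limited),
--                   ('chargers', charger_limited), ('time', time_limited),
--                   ('demand', total_vehicles)]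
--     best_name, best_value = candidates[0]
--     for name, value in candidates[1:]:
--         if value < best_value:
--             best_name, best_value = name, value
--     return best_name
-- ===== Notes on version B (the rewrite author's own statement) =====
-- stated objective: simpler
-- what changed: Replaced min-then-collect-ties-then-if/elif-priority-chain (and the unreachable 'none' branch) by a single argmin pass keeping the first minimal candidate in priority order.
import Mathlib
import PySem

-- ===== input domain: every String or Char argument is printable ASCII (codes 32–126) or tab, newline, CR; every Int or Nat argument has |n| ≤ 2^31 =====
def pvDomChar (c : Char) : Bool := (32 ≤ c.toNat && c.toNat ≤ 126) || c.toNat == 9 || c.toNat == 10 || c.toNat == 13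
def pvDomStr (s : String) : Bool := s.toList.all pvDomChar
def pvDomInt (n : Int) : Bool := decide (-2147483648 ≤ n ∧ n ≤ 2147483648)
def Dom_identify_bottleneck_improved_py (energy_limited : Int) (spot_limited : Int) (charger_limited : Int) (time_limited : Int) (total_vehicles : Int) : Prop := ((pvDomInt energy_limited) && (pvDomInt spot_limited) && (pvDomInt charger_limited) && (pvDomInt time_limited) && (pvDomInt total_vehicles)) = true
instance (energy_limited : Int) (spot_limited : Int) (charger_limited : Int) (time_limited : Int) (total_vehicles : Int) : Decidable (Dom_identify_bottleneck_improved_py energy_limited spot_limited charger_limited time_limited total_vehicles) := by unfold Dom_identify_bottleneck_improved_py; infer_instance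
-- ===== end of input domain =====

-- B replaces A's min-then-collect-ties-then-priority-chain by one argmin pass keeping the
-- first minimal candidate in priority order (objective: simpler). Both are total.

-- ===== PORT A =====
-- literal transliteration of A: dict → assoc list, min(values()), tie list, if/elif chain.
-- the list of values is a nonempty literal, so min? is always some; .getD 0 is never used.
def identify_bottleneck_improved_py (energy_limited : Int) (spot_limited : Int) (charger_limited : Int) (time_limited : Int) (total_vehicles : Int) : String :=
  let constraints : List (String × Int) :=
    [("energy", energy_limited), ("spots", spot_limited), ("chargers", charger_limited),
     ("time", time_limited), ("demand", total_vehicles)]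
  let min_capacity : Int := (PySem.List.min? (constraints.map Prod.snd) (fun x => x)).getD 0
  let limiting_factors : List String :=
    (constraints.filter (fun p => p.2 == min_capacity)).map Prod.fst
  if limiting_factors.length == 1 then (PySem.List.pyGet? limiting_factors 0).getD ""
  else if limiting_factors.contains "energy" then "energy"
  else if limiting_factors.contains "spots" then "spots"
  else if limiting_factors.contains "chargers" then "chargers"
  else if limiting_factors.contains "time" then "time"
  else "none"

-- ===== PORT B =====
-- literal transliteration of Source B: one fold over candidates[1:], starting from candidates[0].
def identify_bottleneck_improved_py_alt (energy_limited : Int) (spot_limited : Int) (charger_limited : Int) (time_limited : Int) (total_vehicles : Int) : String :=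
  let candidates : List (String × Int) :=
    [("energy", energy_limited), ("spots", spot_limited), ("chargers", charger_limited),
     ("time", time_limited), ("demand", total_vehicles)]
  let best0 := candidates.headD ("", 0)
  ((candidates.drop 1).foldl (fun best p => if p.2 < best.2 then p else best) best0).1

-- ===== PRECONDITION & SPEC =====
def Spec_identify_bottleneck_improved_py (energy_limited : Int) (spot_limited : Int) (charger_limited : Int) (time_limited : Int) (total_vehicles : Int) (out : String) : Prop := out = identify_bottleneck_improved_py_alt energy_limited spot_limited charger_limited time_limited total_vehicles
instance (energy_limited : Int) (spot_limited : Int) (charger_limited : Int) (time_limited : Int) (total_vehicles : Int) (out : String) : Decidable (Spec_identify_bottleneck_improved_py energy_limited spot_limited charger_limited time_limited total_vehicles out) := by unfold Spec_identify_bottleneck_improved_py; infer_instance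

-- ===== CLAIM (what is proved, stated in full; the proofs are below) =====
def Claim_equal_identify_bottleneck_improved_py : Prop := ∀ (energy_limited : Int) (spot_limited : Int) (charger_limited : Int) (time_limited : Int) (total_vehicles : Int), Dom_identify_bottleneck_improved_py energy_limited spot_limited charger_limited time_limited total_vehicles → Spec_identify_bottleneck_improved_py energy_limited spot_limited charger_limited time_limited total_vehicles (identify_bottleneck_improved_py energy_limited spot_limited charger_limited time_limited total_vehicles)

-- ===== LEMMAS AND PROOFS =====

-- ===== VERDICT (by name: the statement is the Claim_ definition above) =====
set_option maxHeartbeats 2000000 in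
theorem identify_bottleneck_improved_py_spec : Claim_equal_identify_bottleneck_improved_py := by
  intro e s c t d _
  unfold Spec_identify_bottleneck_improved_py identify_bottleneck_improved_py identify_bottleneck_improved_py_alt
  simp only [List.map_cons, List.map_nil, PySem.List.min?_id_cons, List.foldl, List.headD,
    List.drop, Option.getD]
  generalize hm : min (min (min (min e s) c) t) d = m
  by_cases he : e = m <;> by_cases hs : s = m <;> by_cases hc : c = m <;>
    by_cases ht : t = m <;> by_cases hd : d = m <;>
    simp only [List.filter_cons, List.filter_nil, beq_iff_eq, he, hs, hc, ht, hd,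
      if_true, if_false, ite_true, ite_false, eq_self_iff_true, not_false_iff,
      List.map_cons, List.map_nil, List.length_cons, List.length_nil,
      List.contains_cons, List.contains_nil, PySem.List.pyGet?, PySem.List.pyIdx?] <;>
    simp <;> split_ifs <;> first | rfl | omega
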